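-- pv_equiv track=rewrite | github.com/tngjunwei/adventofcode2023 | day3.py | process
-- ===== SOURCE A (Python) =====
-- def process(grid):
--     total = 0
--     curr = 0
--     for row in grid:
--         for digit in row:
--             if digit != -1:
--                 if curr == 0: curr += digit
--                 else: curr = curr * 10 + digit
--             else:
--                 if curr != 0:
--                     total += curr
--                     curr = 0
--
--         if curr != 0:
--             total += curr
--             curr = 0
--
--     return total
-- ===== SOURCE B (Python) =====
-- def split_runs(row):
--     """Split a row on -1 into the maximal runs of non-separator values."""
--     runs = []
--     cur = []
--     for d in row:
--         if d == -1:
--             runs.append(cur)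
--             cur = []
--         else:
--             cur.append(d)
--     runs.append(cur)
--     return runs
--
--
-- def process(grid):
--     total = 0
--     for row in grid:
--         for run in split_runs(row):
--             v = 0
--             for d in run:
--                 v = v * 10 + d
--             total += v
--     return total
-- ===== Notes on version B (the rewrite author's own statement) =====
-- stated objective: alternative
-- what changed: Replaces A's interleaved total/curr state machine with flush-on-separator by a split-then-fold pipeline: each row is partitioned into maximal runs between -1 separators, each run is folded into its number with acc*10+d seeded at 0, and the run values are summed (empty runs contribute 0, so no flush bookkeeping is needed).
import Mathlib
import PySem

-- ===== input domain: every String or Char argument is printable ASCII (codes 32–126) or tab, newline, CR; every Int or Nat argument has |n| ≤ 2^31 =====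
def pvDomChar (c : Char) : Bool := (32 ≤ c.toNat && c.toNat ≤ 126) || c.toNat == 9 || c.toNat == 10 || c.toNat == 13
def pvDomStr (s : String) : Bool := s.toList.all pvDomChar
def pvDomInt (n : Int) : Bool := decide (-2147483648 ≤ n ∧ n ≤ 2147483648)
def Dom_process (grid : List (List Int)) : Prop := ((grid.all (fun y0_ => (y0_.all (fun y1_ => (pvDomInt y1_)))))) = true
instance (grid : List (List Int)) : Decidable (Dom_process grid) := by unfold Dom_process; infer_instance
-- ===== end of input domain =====

-- B replaces A's total/curr state machine by splitting each row on -1 into runs and folding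
-- each run with acc*10+d (objective: alternative decomposition, same cost).

-- ===== PORT A =====
-- literal transliteration of A's state machine: state (total, curr)
def process (grid : List (List Int)) : Int :=
  let s := grid.foldl (fun (s : Int × Int) row =>
    let s := row.foldl (fun (s : Int × Int) digit =>
      let total := s.1
      let curr := s.2
      if digit ≠ -1 then
        if curr == 0 then (total, curr + digit) else (total, curr * 10 + digit)
      else
        if curr ≠ 0 then (total + curr, 0) else (total, curr)) s
    let total := s.1
    let curr := s.2
    if curr ≠ 0 then (total + curr, 0) else (total, curr)) (0, 0)
  s.1

-- ===== PORT B =====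
-- port of Source B's split_runs: accumulate (runs, cur), append the last run at the end
def split_runs (row : List Int) : List (List Int) :=
  let s := row.foldl (fun (s : List (List Int) × List Int) d =>
    if d = -1 then (s.1 ++ [s.2], []) else (s.1, s.2 ++ [d])) ([], [])
  s.1 ++ [s.2]

def process_alt (grid : List (List Int)) : Int :=
  grid.foldl (fun total row =>
    (split_runs row).foldl (fun total run =>
      total + run.foldl (fun v d => v * 10 + d) 0) total) 0

-- ===== PRECONDITION & SPEC =====
def Spec_process (grid : List (List Int)) (out : Int) : Prop := out = process_alt grid
instance (grid : List (List Int)) (out : Int) : Decidable (Spec_process grid out) := by unfold Spec_process; infer_instance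

-- ===== CLAIM (what is proved, stated in full; the proofs are below) =====
def Claim_equal_process : Prop := ∀ (grid : List (List Int)), Dom_process grid → Spec_process grid (process grid)

-- ===== LEMMAS AND PROOFS =====

-- characterisation of a row: rowTot = the flushed values, rowEnd = the pending curr
def rowTot (c : Int) : List Int → Int
  | [] => 0
  | d :: ds => if d = -1 then c + rowTot 0 ds else rowTot (c * 10 + d) ds

def rowEnd (c : Int) : List Int → Int
  | [] => c
  | d :: ds => if d = -1 then rowEnd 0 ds else rowEnd (c * 10 + d) ds

def runVal (l : List Int) : Int := l.foldl (fun v d => v * 10 + d) 0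

theorem runVal_append (l : List Int) (d : Int) :
    runVal (l ++ [d]) = runVal l * 10 + d := by
  simp [runVal]

-- A's inner loop computes rowTot / rowEnd
theorem foldA_eq (row : List Int) : ∀ (t c : Int),
    row.foldl (fun (s : Int × Int) digit =>
      if digit ≠ -1 then
        if s.2 == 0 then (s.1, s.2 + digit) else (s.1, s.2 * 10 + digit)
      else
        if s.2 ≠ 0 then (s.1 + s.2, 0) else (s.1, s.2)) (t, c)
    = (t + rowTot c row, rowEnd c row) := by
  induction row with
  | nil => intro t c; simp [rowTot, rowEnd]
  | cons d ds ih =>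
    intro t c
    by_cases hd : d = -1
    · subst hd
      by_cases hc : c = 0
      · subst hc; simpa [rowTot, rowEnd] using ih t 0
      · simpa [rowTot, rowEnd, hc, add_assoc] using ih (t + c) 0
    · by_cases hc : c = 0
      · subst hc; simpa [rowTot, rowEnd, hd] using ih t d
      · simpa [rowTot, rowEnd, hd, hc] using ih t (c * 10 + d)

-- B's split-runs fold, with seed (runs, cur), flattens to run values summing to rowTot + rowEnd
theorem foldS_eq (row : List Int) : ∀ (runs : List (List Int)) (cur : List Int),
    (((row.foldl (fun (s : List (List Int) × List Int) d =>
        if d = -1 then (s.1 ++ [s.2], []) else (s.1, s.2 ++ [d])) (runs, cur)).1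
      ++ [(row.foldl (fun (s : List (List Int) × List Int) d =>
        if d = -1 then (s.1 ++ [s.2], []) else (s.1, s.2 ++ [d])) (runs, cur)).2]).map runVal).sum
    = (runs.map runVal).sum + rowTot (runVal cur) row + rowEnd (runVal cur) row := by
  induction row with
  | nil => intro runs cur; simp [rowTot, rowEnd]
  | cons d ds ih =>
    intro runs cur
    by_cases hd : d = -1
    · subst hd
      have h := ih (runs ++ [cur]) []
      simp only [List.foldl_cons, if_true]
      rw [h]
      simp [rowTot, rowEnd, runVal]
      ring
    · have h := ih runs (cur ++ [d])
      simp only [List.foldl_cons, if_neg hd]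
      rw [h, runVal_append]
      simp [rowTot, rowEnd, hd]

-- B's per-row accumulation is total + sum of run values
theorem foldl_add_runVal (rs : List (List Int)) : ∀ (t : Int),
    rs.foldl (fun total run => total + runVal run) t = t + (rs.map runVal).sum := by
  induction rs with
  | nil => intro t; simp
  | cons r rs ih => intro t; simp [ih]; ring

-- per-row agreement: A's row step (fold + flush) adds exactly B's row sum
theorem row_eq (row : List Int) (t : Int) :
    (let s := row.foldl (fun (s : Int × Int) digit =>
        if digit ≠ -1 then
          if s.2 == 0 then (s.1, s.2 + digit) else (s.1, s.2 * 10 + digit)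
        else
          if s.2 ≠ 0 then (s.1 + s.2, 0) else (s.1, s.2)) (t, 0)
     (if s.2 ≠ 0 then (s.1 + s.2, 0) else (s.1, s.2)))
    = (t + ((split_runs row).map runVal).sum, 0) := by
  have hA := foldA_eq row t 0
  have hS := foldS_eq row [] []
  simp only [runVal, List.foldl_nil, List.map_nil, List.sum_nil, zero_add] at hS
  simp only [hA, split_runs, hS]
  by_cases h : rowEnd 0 row = 0 <;> simp [h] <;> try ring

theorem process_eq_aux (grid : List (List Int)) : ∀ (t : Int),
    (grid.foldl (fun (s : Int × Int) row =>
      let s := row.foldl (fun (s : Int × Int) digit =>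
        if digit ≠ -1 then
          if s.2 == 0 then (s.1, s.2 + digit) else (s.1, s.2 * 10 + digit)
        else
          if s.2 ≠ 0 then (s.1 + s.2, 0) else (s.1, s.2)) s
      if s.2 ≠ 0 then (s.1 + s.2, 0) else (s.1, s.2)) (t, 0))
    = (grid.foldl (fun total row =>
        (split_runs row).foldl (fun total run => total + runVal run) total) t, 0) := by
  induction grid with
  | nil => intro t; rfl
  | cons row rows ih =>
    intro t
    have hrow := row_eq row t
    simp only [List.foldl_cons]
    rw [hrow, ih, foldl_add_runVal]

-- ===== VERDICT (by name: the statement is the Claim_ definition above) =====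
theorem process_spec : Claim_equal_process := by
  intro grid _
  show process grid = process_alt grid
  exact congrArg Prod.fst (process_eq_aux grid 0)
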